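-- pv_equiv track=rewrite | github.com/TheFlyingCorpse/netbox-cabinet-view | netbox_cabinet_view/svg/cabinets.py | _empty_ranges_1d
-- ===== SOURCE A (Python) =====
-- def _empty_ranges_1d(occupied, capacity):
--     """
--     Return a list of ``(start, end)`` tuples (both inclusive,
--     1-indexed) for runs of empty slots in ``1..capacity`` given a
--     set of occupied positions. Example::
--
--         occupied = {1, 2, 3, 8, 9, 10}
--         capacity = 12
--         result   = [(4, 7), (11, 12)]
--     """
--     ranges = []
--     start = None
--     for pos in range(1, capacity + 1):
--         if pos not in occupied:
--             if start is None:
--                 start = pos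
--         else:
--             if start is not None:
--                 ranges.append((start, pos - 1))
--                 start = None
--     if start is not None:
--         ranges.append((start, capacity))
--     return ranges
-- ===== SOURCE B (Python) =====
-- def _empty_ranges_1d(occupied, capacity):
--     """Emit gaps between sorted occupied positions instead of scanning 1..capacity."""
--     occ = sorted({p for p in occupied if 1 <= p <= capacity})
--     ranges = []
--     prev = 0
--     for p in occ:
--         if p - prev > 1:
--             ranges.append((prev + 1, p - 1))
--         prev = p
--     if prev < capacity:
--         ranges.append((prev + 1, capacity))
--     return ranges
-- ===== Notes on version B (the rewrite author's own statement) =====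
-- stated objective: alternative
-- what changed: B sorts the deduplicated in-range occupied positions and emits the gaps between consecutive ones (plus the boundary gap up to capacity) instead of scanning every position 1..capacity with a membership test.
import Mathlib
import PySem

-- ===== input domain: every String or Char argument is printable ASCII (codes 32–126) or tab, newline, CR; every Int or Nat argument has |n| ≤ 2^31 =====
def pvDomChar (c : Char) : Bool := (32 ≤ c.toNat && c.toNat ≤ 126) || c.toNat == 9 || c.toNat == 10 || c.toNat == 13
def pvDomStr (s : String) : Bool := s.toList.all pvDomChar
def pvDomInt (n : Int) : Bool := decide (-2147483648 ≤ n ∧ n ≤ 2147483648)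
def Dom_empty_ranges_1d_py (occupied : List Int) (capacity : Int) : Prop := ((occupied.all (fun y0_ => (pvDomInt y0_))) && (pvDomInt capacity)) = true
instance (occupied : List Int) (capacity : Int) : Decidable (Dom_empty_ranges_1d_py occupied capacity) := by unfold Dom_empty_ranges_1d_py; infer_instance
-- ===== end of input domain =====

-- B replaces A's position-by-position scan of 1..capacity by sorting the distinct
-- in-range occupied positions and emitting the gaps between consecutive ones
-- (objective: alternative algorithm; return value proved equal).

-- ===== PORT A =====
-- loop body of A's 'for pos in range(1, capacity+1)'
def pvStepA (occupied : List Int) (st : List (Int × Int) × Option Int) (pos : Int) :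
    List (Int × Int) × Option Int :=
  if occupied.contains pos = false then
    match st.2 with
    | none => (st.1, some pos)
    | some _ => st
  else
    match st.2 with
    | some s => (st.1 ++ [(s, pos - 1)], none)
    | none => st

-- A's trailing 'if start is not None: ranges.append((start, capacity))'
def pvFlushA (capacity : Int) (st : List (Int × Int) × Option Int) : List (Int × Int) :=
  match st.2 with
  | some s => st.1 ++ [(s, capacity)]
  | none => st.1

def empty_ranges_1d_py (occupied : List Int) (capacity : Int) : List (Int × Int) :=
  pvFlushA capacity
    ((PySem.List.pyRange 1 (capacity + 1) 1).foldl (pvStepA occupied) ([], none))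

-- ===== PORT B =====
-- loop body of B's 'for p in occ'
def pvStepB (st : List (Int × Int) × Int) (p : Int) : List (Int × Int) × Int :=
  (if p - st.2 > 1 then st.1 ++ [(st.2 + 1, p - 1)] else st.1, p)

-- B's trailing 'if prev < capacity: ranges.append((prev+1, capacity))'
def pvFlushB (capacity : Int) (st : List (Int × Int) × Int) : List (Int × Int) :=
  if st.2 < capacity then st.1 ++ [(st.2 + 1, capacity)] else st.1

def empty_ranges_1d_py_alt (occupied : List Int) (capacity : Int) : List (Int × Int) :=
  let occ := PySem.List.sorted
    (PySem.Set.ofList (occupied.filter (fun p => decide (1 ≤ p ∧ p ≤ capacity))))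
    (fun x => x) false
  pvFlushB capacity (occ.foldl pvStepB ([], 0))

-- ===== PRECONDITION & SPEC =====
def Spec_empty_ranges_1d_py (occupied : List Int) (capacity : Int) (out : List (Int × Int)) : Prop := out = empty_ranges_1d_py_alt occupied capacity
instance (occupied : List Int) (capacity : Int) (out : List (Int × Int)) : Decidable (Spec_empty_ranges_1d_py occupied capacity out) := by unfold Spec_empty_ranges_1d_py; infer_instance

-- ===== CLAIM (what is proved, stated in full; the proofs are below) =====
def Claim_equal_empty_ranges_1d_py : Prop := ∀ (occupied : List Int) (capacity : Int), Dom_empty_ranges_1d_py occupied capacity → Spec_empty_ranges_1d_py occupied capacity (empty_ranges_1d_py occupied capacity)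

-- ===== LEMMAS AND PROOFS =====

-- Folding A's step over a stretch of positions none of which is occupied,
-- starting with start = None: the accumulator is unchanged and start becomes
-- the first position of the stretch (if any).
theorem pv_fold_empty (occupied : List Int) :
    ∀ (n : Nat) (a : Int) (acc : List (Int × Int)),
    (∀ p : Int, a ≤ p → p < a + n → occupied.contains p = false) →
    (PySem.List.pyRange a (a + n) 1).foldl (pvStepA occupied) (acc, none) =
      (acc, if n = 0 then none else some a) := by
  intro n
  induction n with
  | zero =>
    intro a acc _
    simp [PySem.List.pyRange_one_eq_nil (le_refl a)]
  | succ k ih =>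
    intro a acc h
    have hlt : a < a + (k + 1 : Nat) := by push_cast; omega
    rw [PySem.List.pyRange_one_cons hlt]
    have hca : occupied.contains a = false := h a le_rfl hlt
    have hrange : a + ((k + 1 : Nat) : Int) = (a + 1) + (k : Nat) := by push_cast; omega
    rw [hrange]
    simp only [List.foldl_cons, pvStepA, hca, reduceIte]
    -- after processing a, start = some a; the rest of the stretch keeps it
    have keep : ∀ (m : Nat) (b : Int) (acc' : List (Int × Int)) (s : Int),
        (∀ p : Int, b ≤ p → p < b + m → occupied.contains p = false) →
        (PySem.List.pyRange b (b + m) 1).foldl (pvStepA occupied) (acc', some s) =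
          (acc', some s) := by
      intro m
      induction m with
      | zero => intro b acc' s _; simp [PySem.List.pyRange_one_eq_nil (le_refl b)]
      | succ j ihj =>
        intro b acc' s hb
        have hbl : b < b + (j + 1 : Nat) := by push_cast; omega
        rw [PySem.List.pyRange_one_cons hbl]
        have hcb : occupied.contains b = false := hb b le_rfl hbl
        have hr : b + ((j + 1 : Nat) : Int) = (b + 1) + (j : Nat) := by push_cast; omega
        rw [hr]
        simp only [List.foldl_cons, pvStepA, hcb, reduceIte]
        exact ihj (b + 1) acc' s (fun p h1 h2 => hb p (by omega) (by push_cast at h2 ⊢; omega))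
    rw [keep k (a + 1) acc a (fun p h1 h2 => h p (by omega) (by push_cast at h2 ⊢; omega))]
    simp

-- Main bridge: A's scan of (prev, cap] equals B's gap emission over the sorted
-- list s of occupied positions in (prev, cap].
theorem pv_main (occupied : List Int) :
    ∀ (s : List Int) (prev cap : Int) (acc : List (Int × Int)),
    s.Pairwise (· < ·) →
    (∀ p : Int, p ∈ s ↔ occupied.contains p = true ∧ prev < p ∧ p ≤ cap) →
    pvFlushA cap ((PySem.List.pyRange (prev + 1) (cap + 1) 1).foldl (pvStepA occupied) (acc, none)) =
      pvFlushB cap (s.foldl pvStepB (acc, prev)) := by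
  intro s
  induction s with
  | nil =>
    intro prev cap acc _ hmem
    have hno : ∀ p : Int, prev < p → p ≤ cap → occupied.contains p = false := by
      intro p h1 h2
      by_contra hc
      have : p ∈ ([] : List Int) := (hmem p).2 ⟨by revert hc; cases occupied.contains p <;> simp, h1, h2⟩
      simp at this
    by_cases hpc : prev < cap
    · have hn : cap + 1 = (prev + 1) + ((cap - prev).toNat : Nat) := by omega
      rw [hn, pv_fold_empty occupied _ _ acc (fun p h1 h2 => hno p (by omega) (by omega))]
      have : (cap - prev).toNat ≠ 0 := by omega
      simp [this, pvFlushA, pvFlushB, hpc]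
    · rw [PySem.List.pyRange_one_eq_nil (by omega)]
      simp [pvFlushA, pvFlushB, hpc]
  | cons m rest ih =>
    intro prev cap acc hpair hmem
    have hm := (hmem m).1 (List.mem_cons_self ..)
    obtain ⟨hcm, hprevm, hmcap⟩ := hm
    have hrestgt : ∀ p ∈ rest, m < p := fun p hp => List.rel_of_pairwise_cons hpair hp
    have hmemrest : ∀ p : Int, p ∈ rest ↔ occupied.contains p = true ∧ m < p ∧ p ≤ cap := by
      intro p
      constructor
      · intro hp
        have := (hmem p).1 (List.mem_cons_of_mem _ hp)
        exact ⟨this.1, hrestgt p hp, this.2.2⟩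
      · intro ⟨h1, h2, h3⟩
        have : p ∈ m :: rest := (hmem p).2 ⟨h1, by omega, h3⟩
        cases this with
        | head => omega
        | tail _ hp => exact hp
    have hstretch : ∀ p : Int, prev + 1 ≤ p → p < m → occupied.contains p = false := by
      intro p h1 h2
      by_contra hc
      have hct : occupied.contains p = true := by revert hc; cases occupied.contains p <;> simp
      have : p ∈ m :: rest := (hmem p).2 ⟨hct, by omega, by omega⟩
      cases this with
      | head => omega
      | tail _ hp => exact absurd (hrestgt p hp) (by omega)
    -- split the scan: (prev, m-1], then m, then (m, cap]
    rw [PySem.List.pyRange_one_append (prev + 1) (m + 1) (cap + 1) (by omega) (by omega),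
        PySem.List.pyRange_one_append (prev + 1) m (m + 1) (by omega) (by omega),
        PySem.List.pyRange_one_singleton]
    have hn : m = (prev + 1) + ((m - prev - 1).toNat : Nat) := by omega
    rw [List.foldl_append, List.foldl_append]
    rw [show PySem.List.pyRange (prev + 1) m 1 = PySem.List.pyRange (prev + 1) ((prev + 1) + ((m - prev - 1).toNat : Nat)) 1 from by rw [← hn]]
    rw [pv_fold_empty occupied _ _ acc (fun p h1 h2 => hstretch p h1 (by omega))]
    have hmmem : m ∈ occupied := by simpa using hcm
    have hrhs : (m :: rest).foldl pvStepB (acc, prev) =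
        rest.foldl pvStepB ((if m - prev > 1 then acc ++ [(prev + 1, m - 1)] else acc), m) := by
      simp [pvStepB]
    rw [hrhs]
    by_cases hone : m - prev > 1
    · have hne : (m - prev - 1).toNat ≠ 0 := by omega
      simp only [hne, if_false]
      have hstep : List.foldl (pvStepA occupied) (acc, some (prev + 1)) [m] =
          (acc ++ [(prev + 1, m - 1)], none) := by
        simp [pvStepA, hmmem]
      rw [hstep, if_pos hone]
      exact ih m cap (acc ++ [(prev + 1, m - 1)]) (List.Pairwise.of_cons hpair) hmemrest
    · have h0 : (m - prev - 1).toNat = 0 := by omega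
      simp only [h0, reduceIte]
      have hstep : List.foldl (pvStepA occupied) (acc, none) [m] = (acc, none) := by
        simp [pvStepA, hmmem]
      rw [hstep, if_neg hone]
      exact ih m cap acc (List.Pairwise.of_cons hpair) hmemrest

-- ===== VERDICT (by name: the statement is the Claim_ definition above) =====
theorem empty_ranges_1d_py_spec : Claim_equal_empty_ranges_1d_py := by
  intro occupied capacity _
  unfold Spec_empty_ranges_1d_py empty_ranges_1d_py empty_ranges_1d_py_alt
  have hmem : ∀ p : Int,
      p ∈ PySem.List.sorted (PySem.Set.ofList (occupied.filter (fun p => decide (1 ≤ p ∧ p ≤ capacity)))) (fun x => x) false ↔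
      occupied.contains p = true ∧ 0 < p ∧ p ≤ capacity := by
    intro p
    rw [PySem.List.mem_sorted, PySem.Set.mem_ofList, List.mem_filter]
    simp
    omega
  have hpair := PySem.List.sorted_ofList_pairwise_lt
    (xs := occupied.filter (fun p => decide (1 ≤ p ∧ p ≤ capacity)))
  have := pv_main occupied
    (PySem.List.sorted (PySem.Set.ofList (occupied.filter (fun p => decide (1 ≤ p ∧ p ≤ capacity)))) (fun x => x) false)
    0 capacity [] hpair (by simpa using hmem)
  simpa using this
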